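-- pv_equiv track=rewrite | github.com/wenke727/learningNote | algorithm/alg/sweep_line.py | takeCoins
-- ===== SOURCE A (Python) =====
-- def takeCoins(nums, k):
--     n = len(nums)
--     lo, hi = 0, k-1
--
--     max_coins = running_coins = sum(nums[lo:hi+1])
--     while hi != -1:
--         running_coins -= nums[hi]
--         lo -= 1
--         hi -= 1
--         running_coins += nums[lo]
--
--         max_coins = max(max_coins, running_coins)
--
--     return max_coins
-- ===== SOURCE B (Python) =====
-- def takeCoins(nums, k):
--     n = len(nums)
--     P = [0]
--     for x in nums:
--         P.append(P[-1] + x)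
--     total = P[-1]
--     return max(P[k - j] + (total - P[n - j]) for j in range(k + 1))
-- ===== Notes on version B (the rewrite author's own statement) =====
-- stated objective: alternative
-- what changed: Replaces A's wrapping sliding window (incrementally shifting the window across the array end with negative indexing) by a prefix-sum table: one pass builds P with P[i]=sum(nums[:i]), then the answer is max over j of P[k-j]+(total-P[n-j]), pure table lookups per split count; same cost, different decomposition.
import Mathlib
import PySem

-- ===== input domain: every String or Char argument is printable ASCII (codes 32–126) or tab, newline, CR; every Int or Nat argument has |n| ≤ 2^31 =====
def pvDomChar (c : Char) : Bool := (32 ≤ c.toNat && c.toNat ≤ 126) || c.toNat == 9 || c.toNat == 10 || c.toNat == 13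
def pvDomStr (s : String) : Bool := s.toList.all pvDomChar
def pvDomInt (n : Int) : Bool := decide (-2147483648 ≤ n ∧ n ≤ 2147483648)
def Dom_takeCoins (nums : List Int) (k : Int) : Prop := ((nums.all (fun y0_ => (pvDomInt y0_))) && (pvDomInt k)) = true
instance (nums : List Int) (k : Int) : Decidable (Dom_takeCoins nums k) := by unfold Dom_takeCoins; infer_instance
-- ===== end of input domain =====

-- B replaces A's wrapping sliding window by a prefix-sum table looked up once per split count (objective: alternative decomposition, same cost).

-- ===== PORT A =====
-- The while loop runs while hi ≠ -1; for k ≥ 0 that is exactly k iterations, so the fuel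
-- (hi+1).toNat counts them. For k < 0 Python never returns normally (it eventually raises
-- IndexError), which Pre_ excludes; there the fuel is 0 and the port's value is not claimed.
-- pyGet? = none models Python's IndexError (outside Pre_ only); the final .getD 0 is unreached on Pre_.
def takeCoinsLoop (nums : List Int) : Nat → Int → Int → Int → Int → Option Int
  | 0, _lo, _hi, _running, maxCoins => some maxCoins
  | f+1, lo, hi, running, maxCoins =>
    match PySem.List.pyGet? nums hi with
    | none => none
    | some a =>
      let running1 := running - a
      let lo1 := lo - 1
      let hi1 := hi - 1
      match PySem.List.pyGet? nums lo1 with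
      | none => none
      | some b =>
        let running2 := running1 + b
        takeCoinsLoop nums f lo1 hi1 running2 (max maxCoins running2)

def takeCoins (nums : List Int) (k : Int) : Int :=
  let hi : Int := k - 1
  let init : Int := (PySem.List.slice nums (some 0) (some (hi + 1))).sum
  (takeCoinsLoop nums (hi + 1).toNat 0 hi init init).getD 0

-- ===== PORT B =====
-- P[-1] is PySem.List.pyGetD P (-1) 0 (P is never empty); max() of the candidate list via
-- PySem.List.max?; none (= Python's IndexError / ValueError on empty max) only outside Pre_.
def takeCoins_alt (nums : List Int) (k : Int) : Int :=
  let n : Int := nums.length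
  let P : List Int := nums.foldl (fun P x => P ++ [PySem.List.pyGetD P (-1) 0 + x]) [(0 : Int)]
  let total : Int := PySem.List.pyGetD P (-1) 0
  let cands : List Int := (PySem.List.pyRange 0 (k + 1) 1).map
    (fun j => PySem.List.pyGetD P (k - j) 0 + (total - PySem.List.pyGetD P (n - j) 0))
  (PySem.List.max? cands (fun y => y)).getD 0

-- ===== PRECONDITION & SPEC =====
-- Pre_ excludes exactly the inputs where Python A raises (k > len: IndexError at nums[k-1];
-- k < 0: the loop walks off the left end and raises IndexError, or loops forever on []).
def Pre_takeCoins (nums : List Int) (k : Int) : Prop := 0 ≤ k ∧ k ≤ (nums.length : Int)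
instance (nums : List Int) (k : Int) : Decidable (Pre_takeCoins nums k) := by
  unfold Pre_takeCoins; infer_instance

def pvWitness_takeCoins : List Int × Int := ([3, -1, 4, 1, -5], 3)

def Spec_takeCoins (nums : List Int) (k : Int) (out : Int) : Prop := out = takeCoins_alt nums k
instance (nums : List Int) (k : Int) (out : Int) : Decidable (Spec_takeCoins nums k out) := by
  unfold Spec_takeCoins; infer_instance

-- ===== CLAIM (what is proved, stated in full; the proofs are below) =====
def Claim_equal_takeCoins : Prop := ∀ (nums : List Int) (k : Int), Dom_takeCoins nums k → Pre_takeCoins nums k → Spec_takeCoins nums k (takeCoins nums k)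

-- ===== LEMMAS AND PROOFS =====

-- sum of the first m elements
def pfx (nums : List Int) (m : Nat) : Int := (nums.take m).sum

-- value of the split "take kN - j from the left, j from the right"
def Wf (nums : List Int) (kN j : Nat) : Int :=
  pfx nums (kN - j) + (nums.sum - pfx nums (nums.length - j))

theorem foldP (l : List Int) : ∀ (acc : List Int), acc ≠ [] →
    l.foldl (fun P x => P ++ [PySem.List.pyGetD P (-1) 0 + x]) acc
      = acc ++ (List.range l.length).map
          (fun m => PySem.List.pyGetD acc (-1) 0 + (l.take (m+1)).sum) := by
  induction l with
  | nil => intro acc _; simp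
  | cons x xs ih =>
    intro acc hacc
    have h1 : (acc ++ [PySem.List.pyGetD acc (-1) 0 + x]) ≠ [] := by simp
    calc (x :: xs).foldl (fun P x => P ++ [PySem.List.pyGetD P (-1) 0 + x]) acc
        = xs.foldl (fun P x => P ++ [PySem.List.pyGetD P (-1) 0 + x])
            (acc ++ [PySem.List.pyGetD acc (-1) 0 + x]) := rfl
      _ = (acc ++ [PySem.List.pyGetD acc (-1) 0 + x])
            ++ (List.range xs.length).map
              (fun m => PySem.List.pyGetD (acc ++ [PySem.List.pyGetD acc (-1) 0 + x]) (-1) 0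
                + (xs.take (m+1)).sum) := ih _ h1
      _ = acc ++ (List.range (x :: xs).length).map
            (fun m => PySem.List.pyGetD acc (-1) 0 + ((x :: xs).take (m+1)).sum) := by
          simp only [PySem.List.pyGetD_neg_one_append_singleton, List.length_cons,
            List.range_succ_eq_map, List.map_cons, List.map_map, List.append_assoc,
            List.singleton_append]
          congr 1
          congr 1
          · simp
          · congr 1
            funext m
            simp only [Function.comp, List.take_succ_cons, List.sum_cons]
            ring

theorem buildP_eq (nums : List Int) :
    nums.foldl (fun P x => P ++ [PySem.List.pyGetD P (-1) 0 + x]) [(0 : Int)]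
      = (List.range (nums.length + 1)).map (pfx nums) := by
  rw [foldP nums [(0 : Int)] (by simp)]
  simp only [show PySem.List.pyGetD [(0 : Int)] (-1) 0 = 0 from rfl,
    List.range_succ_eq_map, List.map_cons, List.map_map, List.singleton_append]
  congr 1
  simp [pfx]

theorem P_get (nums : List Int) (m : Nat) (hm : m ≤ nums.length) :
    PySem.List.pyGetD ((List.range (nums.length + 1)).map (pfx nums)) ((m : Nat) : Int) 0
      = pfx nums m := by
  rw [PySem.List.pyGetD_natCast]
  exact PySem.List.getD_map_range (pfx nums) (nums.length + 1) m 0 (by omega)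

theorem P_last (nums : List Int) :
    PySem.List.pyGetD ((List.range (nums.length + 1)).map (pfx nums)) (-1) 0 = nums.sum := by
  have h := P_get nums nums.length (le_refl _)
  have : ((nums.length : Nat) : Int) = (nums.length : Int) := rfl
  calc PySem.List.pyGetD ((List.range (nums.length + 1)).map (pfx nums)) (-1) 0
      = pfx nums nums.length := by
        have hne : ((List.range (nums.length + 1)).map (pfx nums)) ≠ [] := by simp
        rw [PySem.List.pyGetD_neg_one _ _ hne]
        rw [List.getLast_eq_getElem]
        simp
    _ = nums.sum := by simp [pfx]

theorem Wf_succ (nums : List Int) (kN j : Nat) (hj : j < kN) (hkn : kN ≤ nums.length)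
    (h1 : kN - 1 - j < nums.length) (h2 : nums.length - (j+1) < nums.length) :
    Wf nums kN j - nums[kN - 1 - j]'h1 + nums[nums.length - (j+1)]'h2 = Wf nums kN (j+1) := by
  unfold Wf pfx
  have e3 : kN - (j + 1) = kN - 1 - j := by omega
  have e1 : kN - j = (kN - 1 - j) + 1 := by omega
  have e2 : nums.length - j = (nums.length - (j+1)) + 1 := by omega
  rw [e3, e1, e2, List.sum_take_succ _ _ h1, List.sum_take_succ _ _ h2]
  ring

theorem loopA_inv (nums : List Int) (kN : Nat) (hkn : kN ≤ nums.length) :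
    ∀ (f j : Nat) (m : Int), j + f = kN →
    takeCoinsLoop nums f (-(j : Int)) ((kN : Int) - 1 - j) (Wf nums kN j) m
      = some (((List.range f).map (fun i => Wf nums kN (j + i + 1))).foldl max m) := by
  intro f
  induction f with
  | zero => intro j m _; simp [takeCoinsLoop]
  | succ f ih =>
    intro j m hjf
    have hj : j < kN := by omega
    have hn : 0 < nums.length := by omega
    have hhi : ((kN : Int) - 1 - j) = (((kN - 1 - j : Nat) : Nat) : Int) := by
      omega
    have hb1 : kN - 1 - j < nums.length := by omega
    have hb2 : nums.length - (j + 1) < nums.length := by omega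
    rw [takeCoinsLoop]
    rw [hhi, PySem.List.pyGet?_natCast, List.getElem?_eq_getElem hb1]
    have hlo : (-(j : Int) - 1) = -(((j + 1 : Nat) : Nat) : Int) := by push_cast; ring
    simp only []
    rw [hlo, PySem.List.pyGet?_neg_natCast nums (j+1) (by omega) (by omega),
      List.getElem?_eq_getElem hb2]
    simp only []
    have hr : Wf nums kN j - nums[kN - 1 - j]'hb1 + nums[nums.length - (j+1)]'hb2
        = Wf nums kN (j+1) := Wf_succ nums kN j hj hkn hb1 hb2
    have hhi2 : (((kN - 1 - j : Nat) : Nat) : Int) - 1 = (kN : Int) - 1 - ((j + 1 : Nat) : Int) := by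
      push_cast; omega
    rw [hr, hhi2]
    rw [ih (j+1) (max m (Wf nums kN (j+1))) (by omega)]
    congr 1
    simp only [List.range_succ_eq_map, List.map_cons, List.foldl_cons, List.map_map]
    congr 1
    apply List.map_congr_left
    intro i _
    simp only [Function.comp]
    congr 1
    omega

theorem takeCoins_eq (nums : List Int) (k : Int) (hk0 : 0 ≤ k) (hkn : k ≤ (nums.length : Int)) :
    takeCoins nums k
      = ((List.range k.toNat).map (fun i => Wf nums k.toNat (i + 1))).foldl max
          (Wf nums k.toNat 0) := by
  have hkN : k = ((k.toNat : Nat) : Int) := by omega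
  have hkle : k.toNat ≤ nums.length := by omega
  unfold takeCoins
  simp only []
  have e1 : k - 1 + 1 = k := by ring
  rw [e1]
  have hinit : (PySem.List.slice nums (some 0) (some k)).sum = Wf nums k.toNat 0 := by
    rw [PySem.List.slice_zero_start, PySem.List.slice_to nums hk0]
    unfold Wf pfx
    simp
  rw [hinit]
  have hfuel : k.toNat = (0 : Nat) + k.toNat := by omega
  have h0 : (0 : Int) = -((0 : Nat) : Int) := by simp
  have hhi : k - 1 = ((k.toNat : Int)) - 1 - ((0 : Nat) : Int) := by omega
  rw [h0, hhi]
  rw [loopA_inv nums k.toNat hkle k.toNat 0 (Wf nums k.toNat 0) (by omega)]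
  simp only [Option.getD_some]
  congr 1
  apply List.map_congr_left
  intro i _
  congr 1
  omega

theorem takeCoins_alt_eq (nums : List Int) (k : Int) (hk0 : 0 ≤ k) (hkn : k ≤ (nums.length : Int)) :
    takeCoins_alt nums k
      = ((List.range k.toNat).map (fun i => Wf nums k.toNat (i + 1))).foldl max
          (Wf nums k.toNat 0) := by
  have hkle : k.toNat ≤ nums.length := by omega
  unfold takeCoins_alt
  simp only []
  rw [buildP_eq]
  -- the candidate function agrees with Wf on 0 ≤ j ≤ k
  have hW : ∀ (j : Nat), j ≤ k.toNat →
      PySem.List.pyGetD ((List.range (nums.length + 1)).map (pfx nums)) (k - (j : Int)) 0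
        + (PySem.List.pyGetD ((List.range (nums.length + 1)).map (pfx nums)) (-1) 0
            - PySem.List.pyGetD ((List.range (nums.length + 1)).map (pfx nums))
                ((nums.length : Int) - (j : Int)) 0)
      = Wf nums k.toNat j := by
    intro j hjk
    have e1 : k - (j : Int) = (((k.toNat - j : Nat) : Nat) : Int) := by omega
    have e2 : (nums.length : Int) - (j : Int) = (((nums.length - j : Nat) : Nat) : Int) := by
      omega
    rw [e1, e2, P_get nums _ (by omega), P_get nums _ (by omega), P_last]
    rfl
  have hcons : PySem.List.pyRange 0 (k + 1) 1 = 0 :: PySem.List.pyRange 1 (k + 1) 1 := by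
    have h01 : (0 : Int) < k + 1 := by omega
    have := PySem.List.pyRange_one_cons h01
    simpa using this
  rw [hcons]
  simp only [List.map_cons]
  rw [PySem.List.max?_id_cons]
  simp only [Option.getD_some]
  have h0 : PySem.List.pyGetD ((List.range (nums.length + 1)).map (pfx nums)) (k - 0) 0
      + (PySem.List.pyGetD ((List.range (nums.length + 1)).map (pfx nums)) (-1) 0
          - PySem.List.pyGetD ((List.range (nums.length + 1)).map (pfx nums))
              ((nums.length : Int) - 0) 0)
      = Wf nums k.toNat 0 := by
    have := hW 0 (by omega)
    simpa using this
  rw [h0]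
  congr 1
  rw [PySem.List.pyRange_one 1 (k + 1)]
  have hlen : (k + 1 - 1).toNat = k.toNat := by omega
  rw [hlen, List.map_map]
  apply List.map_congr_left
  intro i hi
  have hik : i < k.toNat := by
    have := List.mem_range.mp hi
    omega
  have e : (1 : Int) + (i : Int) = (((i + 1 : Nat) : Nat) : Int) := by push_cast; ring
  simp only [Function.comp]
  rw [e, hW (i + 1) (by omega)]

-- ===== VERDICT (by name: the statement is the Claim_ definition above) =====
theorem takeCoins_spec : Claim_equal_takeCoins := by
  intro nums k _ hpre
  obtain ⟨hk0, hkn⟩ := hpre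
  unfold Spec_takeCoins
  rw [takeCoins_eq nums k hk0 hkn, takeCoins_alt_eq nums k hk0 hkn]
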